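-- pv_equiv track=rewrite | github.com/northstaraokeystone/greenproof | src/legal/jurisdiction.py | is_blocked_jurisdiction
-- ===== SOURCE A (Python) =====
-- BLOCKED_JURISDICTIONS = [
--     "EU",     # European Union - GDPR
--     "UK",     # United Kingdom - UK GDPR
--     "CH",     # Switzerland - FADP
--     "BR",     # Brazil - LGPD
--     "CN",     # China - PIPL
--     "IN",     # India - DPDP
--     "JP",     # Japan - APPI
--     "KR",     # South Korea - PIPA
--     "AU",     # Australia - Privacy Act
--     "NZ",     # New Zealand - Privacy Act
-- ]
--
-- EU_MEMBER_STATES = [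
--     "AT", "BE", "BG", "HR", "CY", "CZ", "DK", "EE", "FI", "FR",
--     "DE", "GR", "HU", "IE", "IT", "LV", "LT", "LU", "MT", "NL",
--     "PL", "PT", "RO", "SK", "SI", "ES", "SE",
-- ]
--
-- def is_blocked_jurisdiction(jurisdiction_id: str | None) -> bool:
--     """Check if jurisdiction ID indicates blocked jurisdiction.
--
--     Args:
--         jurisdiction_id: Jurisdiction ID to check
--
--     Returns:
--         bool: True if blocked (GDPR, etc.)
--     """
--     if not jurisdiction_id:
--         return False
--
--     jurisdiction_upper = jurisdiction_id.upper()
--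
--     # Check blocked jurisdictions
--     for blocked in BLOCKED_JURISDICTIONS:
--         if jurisdiction_upper.startswith(f"{blocked}-"):
--             return True
--
--     # Check EU member states
--     for eu_state in EU_MEMBER_STATES:
--         if jurisdiction_upper.startswith(f"{eu_state}-"):
--             return True
--
--     return False
-- ===== SOURCE B (Python) =====
-- BLOCKED_PREFIXES = frozenset([
--     "EU", "UK", "CH", "BR", "CN", "IN", "JP", "KR", "AU", "NZ",
--     "AT", "BE", "BG", "HR", "CY", "CZ", "DK", "EE", "FI", "FR",
--     "DE", "GR", "HU", "IE", "IT", "LV", "LT", "LU", "MT", "NL",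
--     "PL", "PT", "RO", "SK", "SI", "ES", "SE",
-- ])
--
--
-- def is_blocked_jurisdiction(jurisdiction_id):
--     """Check if jurisdiction ID indicates blocked jurisdiction."""
--     if not jurisdiction_id:
--         return False
--     prefix, sep, _ = jurisdiction_id.upper().partition("-")
--     return bool(sep) and prefix in BLOCKED_PREFIXES
-- ===== Notes on version B (the rewrite author's own statement) =====
-- stated objective: simpler
-- what changed: Replaced the two startswith scan-loops over BLOCKED_JURISDICTIONS and EU_MEMBER_STATES by a single partition at the first dash followed by one membership lookup of the prefix in a merged frozenset.
import Mathlib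
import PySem

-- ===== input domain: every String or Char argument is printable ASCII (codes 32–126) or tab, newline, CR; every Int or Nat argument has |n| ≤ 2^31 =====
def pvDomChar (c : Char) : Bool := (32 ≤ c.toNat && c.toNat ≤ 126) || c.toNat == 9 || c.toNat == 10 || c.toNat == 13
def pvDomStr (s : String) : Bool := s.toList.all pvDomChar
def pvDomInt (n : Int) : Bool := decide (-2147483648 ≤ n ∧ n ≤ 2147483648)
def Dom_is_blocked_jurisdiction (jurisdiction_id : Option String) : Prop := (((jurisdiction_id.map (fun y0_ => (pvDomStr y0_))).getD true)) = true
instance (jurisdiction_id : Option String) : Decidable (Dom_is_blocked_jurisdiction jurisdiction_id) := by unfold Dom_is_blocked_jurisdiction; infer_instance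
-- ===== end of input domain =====

-- B replaces A's two startswith scan-loops by one partition at the first '-' plus a single
-- lookup of the prefix in a merged set (objective: simpler).

-- ===== PORT A =====
def BLOCKED_JURISDICTIONS : List String :=
  ["EU", "UK", "CH", "BR", "CN", "IN", "JP", "KR", "AU", "NZ"]

def EU_MEMBER_STATES : List String :=
  ["AT", "BE", "BG", "HR", "CY", "CZ", "DK", "EE", "FI", "FR",
   "DE", "GR", "HU", "IE", "IT", "LV", "LT", "LU", "MT", "NL",
   "PL", "PT", "RO", "SK", "SI", "ES", "SE"]

-- Python's early-return 'for' loops over the two constant lists are List.any;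
-- 'if not jurisdiction_id' is the none / empty-string guard.
def is_blocked_jurisdiction (jurisdiction_id : Option String) : Bool :=
  match jurisdiction_id with
  | none => false
  | some s =>
    if s = "" then false
    else
      let jurisdiction_upper := PySem.Str.upper s
      if BLOCKED_JURISDICTIONS.any
          (fun blocked => PySem.Str.startswith jurisdiction_upper (blocked ++ "-")) then true
      else if EU_MEMBER_STATES.any
          (fun eu_state => PySem.Str.startswith jurisdiction_upper (eu_state ++ "-")) then true
      else false

-- ===== PORT B =====
-- the merged frozenset of prefixes; strings are modelled as their char lists (string
-- equality = char-list equality, exact)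
def BLOCKED_PREFIXES : PySem.Set (List Char) :=
  PySem.Set.ofList
    ["EU".toList, "UK".toList, "CH".toList, "BR".toList, "CN".toList,
     "IN".toList, "JP".toList, "KR".toList, "AU".toList, "NZ".toList,
     "AT".toList, "BE".toList, "BG".toList, "HR".toList, "CY".toList,
     "CZ".toList, "DK".toList, "EE".toList, "FI".toList, "FR".toList,
     "DE".toList, "GR".toList, "HU".toList, "IE".toList, "IT".toList,
     "LV".toList, "LT".toList, "LU".toList, "MT".toList, "NL".toList,
     "PL".toList, "PT".toList, "RO".toList, "SK".toList, "SI".toList,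
     "ES".toList, "SE".toList]

-- str.partition('-') ported by hand (exact): prefix = chars before the first '-',
-- sep is non-empty iff '-' occurs; only those two components are used.
def is_blocked_jurisdiction_alt (jurisdiction_id : Option String) : Bool :=
  match jurisdiction_id with
  | none => false
  | some s =>
    if s = "" then false
    else
      let u := (PySem.Str.upper s).toList
      let prefx := u.takeWhile (fun ch => decide (ch ≠ '-'))
      let sep := u.any (fun ch => decide (ch = '-'))
      sep && PySem.Set.contains BLOCKED_PREFIXES prefx

-- ===== PRECONDITION & SPEC =====
def Spec_is_blocked_jurisdiction (jurisdiction_id : Option String) (out : Bool) : Prop := out = is_blocked_jurisdiction_alt jurisdiction_id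
instance (jurisdiction_id : Option String) (out : Bool) : Decidable (Spec_is_blocked_jurisdiction jurisdiction_id out) := by unfold Spec_is_blocked_jurisdiction; infer_instance

-- ===== CLAIM (what is proved, stated in full; the proofs are below) =====
def Claim_equal_is_blocked_jurisdiction : Prop := ∀ (jurisdiction_id : Option String), Dom_is_blocked_jurisdiction jurisdiction_id → Spec_is_blocked_jurisdiction jurisdiction_id (is_blocked_jurisdiction jurisdiction_id)

-- ===== LEMMAS AND PROOFS =====
theorem beq_char_eq_decide (x y : Char) : (x == y) = decide (x = y) := by
  by_cases h : x = y <;> simp [h]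

set_option maxRecDepth 4000 in
theorem prefixes_eval : BLOCKED_PREFIXES =
    ["EU".toList, "UK".toList, "CH".toList, "BR".toList, "CN".toList,
     "IN".toList, "JP".toList, "KR".toList, "AU".toList, "NZ".toList,
     "AT".toList, "BE".toList, "BG".toList, "HR".toList, "CY".toList,
     "CZ".toList, "DK".toList, "EE".toList, "FI".toList, "FR".toList,
     "DE".toList, "GR".toList, "HU".toList, "IE".toList, "IT".toList,
     "LV".toList, "LT".toList, "LU".toList, "MT".toList, "NL".toList,
     "PL".toList, "PT".toList, "RO".toList, "SK".toList, "SI".toList,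
     "ES".toList, "SE".toList] := by rfl

set_option maxRecDepth 4000 in
set_option maxHeartbeats 1000000 in
theorem key (l : List Char) :
  (if BLOCKED_JURISDICTIONS.any (fun b => PySem.Chars.startswith l (b ++ "-").toList) then true
   else if EU_MEMBER_STATES.any (fun e => PySem.Chars.startswith l (e ++ "-").toList) then true
   else false)
  = ((l.any fun ch => decide (ch = '-')) &&
      PySem.Set.contains BLOCKED_PREFIXES (l.takeWhile fun ch => decide (ch ≠ '-'))) := by
  match l with
  | [] => decide
  | [a] =>
    simp [BLOCKED_JURISDICTIONS, EU_MEMBER_STATES, BLOCKED_PREFIXES, PySem.Chars.startswith,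
      List.isPrefixOf, PySem.Set.contains, PySem.Set.ofList, List.takeWhile]
    split <;> simp_all
  | [a, b] =>
    simp [BLOCKED_JURISDICTIONS, EU_MEMBER_STATES, BLOCKED_PREFIXES, PySem.Chars.startswith,
      List.isPrefixOf, PySem.Set.contains, PySem.Set.ofList, List.takeWhile]
    split <;> (try split) <;> simp_all
  | a :: b :: c :: t =>
    by_cases ha : a = '-' <;> by_cases hb : b = '-' <;> by_cases hc : c = '-' <;>
      simp_all [BLOCKED_JURISDICTIONS, EU_MEMBER_STATES, prefixes_eval, PySem.Chars.startswith,
        List.isPrefixOf, PySem.Set.contains, List.takeWhile] <;>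
      simp_all [beq_char_eq_decide, @eq_comm Char, Bool.or_assoc]

-- ===== VERDICT (by name: the statement is the Claim_ definition above) =====
theorem is_blocked_jurisdiction_spec : Claim_equal_is_blocked_jurisdiction := by
  intro jurisdiction_id _
  unfold Spec_is_blocked_jurisdiction
  match jurisdiction_id with
  | none => rfl
  | some s =>
    by_cases hs : s = ""
    · simp [is_blocked_jurisdiction, is_blocked_jurisdiction_alt, hs]
    · have h := key (PySem.Str.upper s).toList
      simp only [is_blocked_jurisdiction, is_blocked_jurisdiction_alt, hs, if_false,
        PySem.Str.startswith_eq]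
      exact h
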